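-- pv_equiv track=rewrite | github.com/raccoongang/azure-video-pipeline | azure_video_pipeline/utils.py | get_captions_info_and_download_video_url
-- ===== SOURCE A (Python) =====
-- def get_captions_info_and_download_video_url(locator, files):
--     captions = []
--     download_video_url = ''
--     file_size = 0
--     path = locator.get('Path').split(':', 1)[-1]
--     for afile in files:
--         try:
--             content_file_size = int(afile.get('ContentFileSize', 0))
--         except ValueError:
--             content_file_size = 0
--         if afile.get('Name', '').endswith('.vtt'):
--             filename = afile['Name']
--             download_url = u'/{}?'.format(filename).join(path.split('?'))
--             captions.append({
--                 'download_url': download_url,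
--                 'file_name': filename,
--             })
--         elif afile.get('Name', '').endswith('.mp4') and content_file_size > file_size:
--             filename = afile['Name']
--             file_size = content_file_size
--             download_video_url = u'/{}?'.format(filename).join(path.split('?'))
--
--     return captions, download_video_url
-- ===== SOURCE B (Python) =====
-- def get_captions_info_and_download_video_url(locator, files):
--     path = locator['Path'].split(':', 1)[-1]
--     pieces = path.split('?')
--
--     def download_url(name):
--         return u'/{}?'.format(name).join(pieces)
--
--     def size(afile):
--         try:
--             return int(afile.get('ContentFileSize', 0))
--         except ValueError:
--             return 0
--
--     captions = [
--         {'download_url': download_url(f['Name']), 'file_name': f['Name']}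
--         for f in files
--         if f.get('Name', '').endswith('.vtt')
--     ]
--     best = max(
--         (f for f in files
--          if f.get('Name', '').endswith('.mp4') and size(f) > 0),
--         key=size,
--         default=None,
--     )
--     download_video_url = download_url(best['Name']) if best is not None else ''
--     return captions, download_video_url
-- ===== Notes on version B (the rewrite author's own statement) =====
-- stated objective: simpler
-- what changed: A's single loop threading three accumulators (captions, best url, best size) is split into a filter+map comprehension for the captions and a separate max(..., key=size, default=None) over the mp4 files with positive parsed size for the video URL.
import Mathlib
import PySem

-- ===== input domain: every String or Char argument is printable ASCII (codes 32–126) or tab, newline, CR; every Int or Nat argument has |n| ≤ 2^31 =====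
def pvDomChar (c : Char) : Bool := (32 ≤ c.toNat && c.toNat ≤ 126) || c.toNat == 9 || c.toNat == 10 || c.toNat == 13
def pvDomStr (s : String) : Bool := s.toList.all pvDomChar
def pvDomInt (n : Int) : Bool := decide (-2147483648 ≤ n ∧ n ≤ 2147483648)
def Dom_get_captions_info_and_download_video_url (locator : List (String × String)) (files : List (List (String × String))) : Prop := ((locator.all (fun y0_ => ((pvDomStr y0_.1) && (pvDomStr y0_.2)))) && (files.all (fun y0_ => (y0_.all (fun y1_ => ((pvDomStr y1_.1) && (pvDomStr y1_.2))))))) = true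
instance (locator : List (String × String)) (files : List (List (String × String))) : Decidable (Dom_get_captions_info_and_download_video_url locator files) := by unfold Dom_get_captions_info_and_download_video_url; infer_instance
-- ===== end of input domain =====

-- B replaces A's single three-accumulator loop by two independent passes: captions as a
-- filter+map comprehension, the video URL via max(..., key=size) over the mp4 candidates
-- (objective: simpler decomposition; same asymptotic cost).

-- ===== PORT A =====

-- int(afile.get('ContentFileSize', 0)) with ValueError caught -> 0
def pvSizeA (afile : List (String × String)) : Int :=
  match PySem.Dict.get? (PySem.Dict.mk afile) "ContentFileSize" with
  | none => 0
  | some s => (PySem.Int.ofStr? s).getD 0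

-- the body of A's for-loop, threading (captions, download_video_url, file_size);
-- A's temporaries content_file_size / filename / download_url are inlined unchanged
def pvAStep (path : String) (st : (List (List (String × String))) × String × Int) (afile : List (String × String)) : (List (List (String × String))) × String × Int :=
  if PySem.Str.endswith (PySem.Dict.getD (PySem.Dict.mk afile) "Name" "") ".vtt" then
    (st.1 ++ [[("download_url", PySem.Str.join ("/" ++ PySem.Dict.getD (PySem.Dict.mk afile) "Name" "" ++ "?") ((PySem.Str.split? path "?").getD [])),
               ("file_name", PySem.Dict.getD (PySem.Dict.mk afile) "Name" "")]], st.2.1, st.2.2)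
  else if PySem.Str.endswith (PySem.Dict.getD (PySem.Dict.mk afile) "Name" "") ".mp4" && decide (st.2.2 < pvSizeA afile) then
    (st.1, PySem.Str.join ("/" ++ PySem.Dict.getD (PySem.Dict.mk afile) "Name" "" ++ "?") ((PySem.Str.split? path "?").getD []), pvSizeA afile)
  else st

def get_captions_info_and_download_video_url (locator : List (String × String)) (files : List (List (String × String))) : (List (List (String × String))) × String :=
  -- locator.get('Path').split(':', 1)[-1]  (Pre_ guarantees 'Path' is present)
  let path : String :=
    (PySem.List.pyGet? ((PySem.Str.splitMax? (PySem.Dict.getD (PySem.Dict.mk locator) "Path" "") ":" 1).getD []) (-1)).getD ""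
  let r := files.foldl (pvAStep path) ([], "", 0)
  (r.1, r.2.1)

-- ===== PORT B =====

-- size(afile): int(afile.get('ContentFileSize', 0)), ValueError -> 0
def pvSizeB (afile : List (String × String)) : Int :=
  match PySem.Dict.get? (PySem.Dict.mk afile) "ContentFileSize" with
  | none => 0
  | some s => (PySem.Int.ofStr? s).getD 0

-- download_url(name) = u'/{}?'.format(name).join(pieces)
def pvUrlB (pieces : List String) (name : String) : String :=
  PySem.Str.join ("/" ++ name ++ "?") pieces

-- f.get('Name', '').endswith('.vtt')
def pvVtt (f : List (String × String)) : Bool :=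
  PySem.Str.endswith (PySem.Dict.getD (PySem.Dict.mk f) "Name" "") ".vtt"

-- f.get('Name', '').endswith('.mp4') and size(f) > 0
def pvCand (f : List (String × String)) : Bool :=
  PySem.Str.endswith (PySem.Dict.getD (PySem.Dict.mk f) "Name" "") ".mp4" && decide (0 < pvSizeB f)

-- {'download_url': …, 'file_name': …}
def pvCap (pieces : List String) (f : List (String × String)) : List (String × String) :=
  [("download_url", pvUrlB pieces (PySem.Dict.getD (PySem.Dict.mk f) "Name" "")),
   ("file_name", PySem.Dict.getD (PySem.Dict.mk f) "Name" "")]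

def get_captions_info_and_download_video_url_alt (locator : List (String × String)) (files : List (List (String × String))) : (List (List (String × String))) × String :=
  let path : String :=
    (PySem.List.pyGet? ((PySem.Str.splitMax? (PySem.Dict.getD (PySem.Dict.mk locator) "Path" "") ":" 1).getD []) (-1)).getD ""
  let pieces := (PySem.Str.split? path "?").getD []
  let captions := (files.filter pvVtt).map (pvCap pieces)
  let best := PySem.List.max? (files.filter pvCand) pvSizeB
  let download_video_url := match best with
    | some f => pvUrlB pieces (PySem.Dict.getD (PySem.Dict.mk f) "Name" "")
    | none => ""
  (captions, download_video_url)

-- ===== PRECONDITION & SPEC =====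
-- A calls .split on locator.get('Path'), which raises AttributeError when the key
-- 'Path' is absent (B raises KeyError there too); Pre_ requires the key to be present.
def Pre_get_captions_info_and_download_video_url (locator : List (String × String)) (files : List (List (String × String))) : Prop :=
  (PySem.Dict.get? (PySem.Dict.mk locator) "Path").isSome = true
instance (locator : List (String × String)) (files : List (List (String × String))) : Decidable (Pre_get_captions_info_and_download_video_url locator files) := by unfold Pre_get_captions_info_and_download_video_url; infer_instance

def pvWitness_get_captions_info_and_download_video_url : (List (String × String)) × (List (List (String × String))) :=
  ([("Path", "asset:https://h/a?sv=1")],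
   [[("Name", "c.vtt")], [("Name", "v.mp4"), ("ContentFileSize", "7")]])

def Spec_get_captions_info_and_download_video_url (locator : List (String × String)) (files : List (List (String × String))) (out : (List (List (String × String))) × String) : Prop := out = get_captions_info_and_download_video_url_alt locator files
instance (locator : List (String × String)) (files : List (List (String × String))) (out : (List (List (String × String))) × String) : Decidable (Spec_get_captions_info_and_download_video_url locator files out) := by unfold Spec_get_captions_info_and_download_video_url; infer_instance

-- ===== CLAIM (what is proved, stated in full; the proofs are below) =====
def Claim_equal_get_captions_info_and_download_video_url : Prop := ∀ (locator : List (String × String)) (files : List (List (String × String))), Dom_get_captions_info_and_download_video_url locator files → Pre_get_captions_info_and_download_video_url locator files → Spec_get_captions_info_and_download_video_url locator files (get_captions_info_and_download_video_url locator files)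

-- ===== LEMMAS AND PROOFS =====

-- a name cannot end in '.vtt' and in '.mp4' at once
theorem pv_vtt_ne_mp4 (s : String) (h : PySem.Str.endswith s ".vtt" = true) :
    PySem.Str.endswith s ".mp4" = false := by
  by_contra hmp
  rw [Bool.not_eq_false] at hmp
  simp only [PySem.Str.endswith, PySem.Chars.endswith, List.isSuffixOf_iff_suffix] at h hmp
  obtain ⟨t1, e1⟩ := h
  obtain ⟨t2, e2⟩ := hmp
  have e : t1 ++ (".vtt").toList = t2 ++ (".mp4").toList := e1.trans e2.symm
  have hlen : t1.length = t2.length := by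
    have := congrArg List.length e
    simp at this; omega
  have := (List.append_inj e hlen).2
  simp at this

-- the step of Python's max(..., key=size) (first of any tie wins)
def pvStep (b : Option (List (String × String))) (f : List (String × String)) : Option (List (String × String)) :=
  match b with
  | none => some f
  | some m => if pvSizeB m < pvSizeB f then some f else some m

theorem pv_max?_eq (l : List (List (String × String))) :
    PySem.List.max? l pvSizeB = l.foldl pvStep none := by
  unfold PySem.List.max?
  congr 1
  funext acc x
  cases acc <;> rfl

-- download_video_url / file_size read off a running best candidate
def pvDvuOf (pieces : List String) (b : Option (List (String × String))) : String :=
  match b with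
  | some f => pvUrlB pieces (PySem.Dict.getD (PySem.Dict.mk f) "Name" "")
  | none => ""

def pvFsOf (b : Option (List (String × String))) : Int :=
  match b with
  | some f => pvSizeB f
  | none => 0

-- the invariant tying A's (url, size) accumulators to B's running best candidate
def pvInv (pieces : List String) (b : Option (List (String × String))) (dvu : String) (fs : Int) : Prop :=
  dvu = pvDvuOf pieces b ∧ fs = pvFsOf b ∧ (∀ g, b = some g → 0 < pvSizeB g)

-- main loop lemma: A's fold = B's filter/map captions + running max over candidates
theorem pv_loop (path : String)
    (files : List (List (String × String)))
    (caps : List (List (String × String))) (dvu : String) (fs : Int)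
    (b : Option (List (String × String)))
    (hinv : pvInv ((PySem.Str.split? path "?").getD []) b dvu fs) :
    files.foldl (pvAStep path) (caps, dvu, fs)
    = (caps ++ (files.filter pvVtt).map (pvCap ((PySem.Str.split? path "?").getD [])),
       pvDvuOf ((PySem.Str.split? path "?").getD []) ((files.filter pvCand).foldl pvStep b),
       pvFsOf ((files.filter pvCand).foldl pvStep b)) := by
  induction files generalizing caps dvu fs b with
  | nil =>
    obtain ⟨h1, h2, _⟩ := hinv
    simp [h1, h2]
  | cons f t ih =>
    obtain ⟨h1, h2, h3⟩ := hinv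
    have hfs : 0 ≤ fs := by
      cases hb : b with
      | none => rw [hb] at h2; simp only [pvFsOf] at h2; omega
      | some g => have := h3 g hb; rw [hb] at h2; simp only [pvFsOf] at h2; omega
    rw [List.foldl_cons]
    by_cases hv : PySem.Str.endswith (PySem.Dict.getD (PySem.Dict.mk f) "Name" "") ".vtt" = true
    · -- the .vtt branch of A / the captions comprehension of B
      have hm : PySem.Str.endswith (PySem.Dict.getD (PySem.Dict.mk f) "Name" "") ".mp4" = false :=
        pv_vtt_ne_mp4 _ hv
      have hvtt : pvVtt f = true := hv
      have hc : pvCand f = false := by unfold pvCand; rw [hm]; rfl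
      have hstep : pvAStep path (caps, dvu, fs) f
          = (caps ++ [pvCap ((PySem.Str.split? path "?").getD []) f], dvu, fs) := by
        unfold pvAStep
        rw [if_pos hv]
        rfl
      rw [hstep, ih _ _ _ b ⟨h1, h2, h3⟩]
      simp [hvtt, hc]
    · have hv' : PySem.Str.endswith (PySem.Dict.getD (PySem.Dict.mk f) "Name" "") ".vtt" = false := by
        simpa using hv
      have hvC : PySem.Chars.endswith (PySem.Dict.getD (PySem.Dict.mk f) "Name" "").toList ['.', 'v', 't', 't'] = false := by
        simpa using hv'
      have hvtt' : pvVtt f = false := hv'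
      by_cases hm : PySem.Str.endswith (PySem.Dict.getD (PySem.Dict.mk f) "Name" "") ".mp4" = true
      · have hsz : pvSizeA f = pvSizeB f := rfl
        by_cases hlt : fs < pvSizeA f
        · -- A takes the mp4 branch: f becomes the running best
          have hcond : (PySem.Str.endswith (PySem.Dict.getD (PySem.Dict.mk f) "Name" "") ".mp4"
              && decide (fs < pvSizeA f)) = true := by rw [hm]; simpa using hlt
          have hc : pvCand f = true := by
            unfold pvCand; rw [hm]; simp only [Bool.true_and, decide_eq_true_eq]; omega
          have hbf : pvStep b f = some f := by
            cases hb : b with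
            | none => rfl
            | some g =>
              rw [hb] at h2; simp only [pvFsOf] at h2
              simp only [pvStep]
              rw [if_pos]; omega
          have hstep : pvAStep path (caps, dvu, fs) f
              = (caps, pvDvuOf ((PySem.Str.split? path "?").getD []) (some f), pvFsOf (some f)) := by
            unfold pvAStep
            rw [if_neg (by simp [hvC]), if_pos hcond]
            rfl
          rw [hstep,
            ih _ _ _ (some f) ⟨rfl, rfl, by intro g hg; cases hg; omega⟩]
          simp [hvtt', hc, hbf]
        · -- A skips f: f is no candidate, or it loses against the running best
          have hcond : ¬ ((PySem.Str.endswith (PySem.Dict.getD (PySem.Dict.mk f) "Name" "") ".mp4"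
              && decide (fs < pvSizeA f)) = true) := by rw [hm]; simpa using hlt
          have hstep : pvAStep path (caps, dvu, fs) f = (caps, dvu, fs) := by
            unfold pvAStep
            rw [if_neg (by simp [hvC]), if_neg hcond]
          have hkeep : (List.filter pvCand (f :: t)).foldl pvStep b
              = (List.filter pvCand t).foldl pvStep b := by
            by_cases hc : pvCand f = true
            · have hpos : 0 < pvSizeB f := by
                have := hc; unfold pvCand at this; rw [hm] at this
                simpa using this
              cases hb : b with
              | none =>
                exfalso
                rw [hb] at h2; simp only [pvFsOf] at h2
                omega
              | some g =>
                have hbg : pvStep (some g) f = some g := by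
                  rw [hb] at h2; simp only [pvFsOf] at h2
                  simp only [pvStep]
                  rw [if_neg]; omega
                rw [List.filter_cons, if_pos hc, List.foldl_cons, hbg]
            · have hc' : pvCand f = false := by simpa using hc
              rw [List.filter_cons, if_neg (by simp [hc'])]
          rw [hstep, ih _ _ _ b ⟨h1, h2, h3⟩, ← hkeep]
          simp [List.filter_cons, hvtt']
      · -- not a .vtt, not an .mp4: invisible to both sides
        have hm' : PySem.Str.endswith (PySem.Dict.getD (PySem.Dict.mk f) "Name" "") ".mp4" = false := by
          simpa using hm
        have hc : pvCand f = false := by unfold pvCand; rw [hm']; rfl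
        have hstep : pvAStep path (caps, dvu, fs) f = (caps, dvu, fs) := by
          unfold pvAStep
          rw [if_neg (by simp [hvC]), if_neg (by rw [hm']; simp)]
        rw [hstep, ih _ _ _ b ⟨h1, h2, h3⟩]
        simp [hvtt', hc]

theorem pv_main (path : String) (files : List (List (String × String))) :
    (let r := files.foldl (pvAStep path) ([], "", 0); (r.1, r.2.1))
    = (((files.filter pvVtt).map (pvCap ((PySem.Str.split? path "?").getD [])),
        match PySem.List.max? (files.filter pvCand) pvSizeB with
        | some f => pvUrlB ((PySem.Str.split? path "?").getD []) (PySem.Dict.getD (PySem.Dict.mk f) "Name" "")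
        | none => "")) := by
  show ((files.foldl (pvAStep path) ([], "", 0)).1, (files.foldl (pvAStep path) ([], "", 0)).2.1) = _
  rw [pv_loop path files [] "" 0 none ⟨rfl, rfl, by intro g hg; cases hg⟩]
  rw [pv_max?_eq]
  rfl

-- ===== VERDICT (by name: the statement is the Claim_ definition above) =====
theorem get_captions_info_and_download_video_url_spec : Claim_equal_get_captions_info_and_download_video_url := by
  intro locator files _ _
  unfold Spec_get_captions_info_and_download_video_url
  unfold get_captions_info_and_download_video_url get_captions_info_and_download_video_url_alt
  exact pv_main _ files
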